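-- pv_equiv track=rewrite | github.com/spreadsheethurts/spreadsheethurts | src/wizard/features/common/general.py | count_digits_parts
-- ===== SOURCE A (Python) =====
-- def count_digits_parts(s: str) -> int:
--     """Counts the number of continuous digit parts in a string."""
--     count = 0
--     in_group = False
--
--     for c in s:
--         if c.isdigit():
--             if not in_group:
--                 count += 1
--                 in_group = True
--         else:
--             in_group = False
--
--     return count
-- ===== SOURCE B (Python) =====
-- import itertools
--
-- def count_digits_parts(s: str) -> int:
--     """Counts the number of continuous digit parts in a string."""
--     return sum(1 for key, _ in itertools.groupby(s, key=str.isdigit) if key)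
-- ===== Notes on version B (the rewrite author's own statement) =====
-- stated objective: idiomatic
-- what changed: Replaces the explicit in_group flag and rising-edge detection with itertools.groupby run-grouping: consecutive characters of equal digit-ness are collapsed into groups and the digit groups are counted.
import Mathlib
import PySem

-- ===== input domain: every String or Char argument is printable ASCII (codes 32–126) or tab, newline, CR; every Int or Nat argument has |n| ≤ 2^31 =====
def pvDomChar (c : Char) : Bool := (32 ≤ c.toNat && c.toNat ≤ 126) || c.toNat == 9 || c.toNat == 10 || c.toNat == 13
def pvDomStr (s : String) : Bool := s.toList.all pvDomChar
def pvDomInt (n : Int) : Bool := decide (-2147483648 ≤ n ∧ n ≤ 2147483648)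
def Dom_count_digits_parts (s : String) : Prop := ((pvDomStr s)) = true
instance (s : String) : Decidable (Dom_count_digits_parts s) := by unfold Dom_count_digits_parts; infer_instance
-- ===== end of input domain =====

-- B replaces A's in_group flag / rising-edge loop with itertools.groupby run-grouping (idiomatic; same cost).


-- ===== PORT A =====
-- A's loop: state (count, in_group), branches in source order.
def cdpStepA : (Int × Bool) → Char → (Int × Bool)
  | (count, inGroup), c =>
    if PySem.Chars.isdigit c then
      if !inGroup then (count + 1, true) else (count, inGroup)
    else (count, false)

def count_digits_parts (s : String) : Int :=
  (s.toList.foldl cdpStepA (0, false)).1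

-- ===== PORT B =====
-- itertools.groupby: split the character stream into maximal runs of equal key (digit-ness).
def cdpGroups : List Char → List (Bool × List Char)
  | [] => []
  | c :: cs =>
    let k := PySem.Chars.isdigit c
    (k, c :: cs.takeWhile (fun d => PySem.Chars.isdigit d == k)) ::
      cdpGroups (cs.dropWhile (fun d => PySem.Chars.isdigit d == k))
termination_by l => l.length
decreasing_by
  exact Nat.lt_succ_of_le (List.length_dropWhile_le _ _)

-- sum(1 for key, _ in groupby(...) if key)
def count_digits_parts_alt (s : String) : Int :=
  ((cdpGroups s.toList).filter (fun g => g.1)).length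

-- ===== PRECONDITION & SPEC =====
def Spec_count_digits_parts (s : String) (out : Int) : Prop := out = count_digits_parts_alt s
instance (s : String) (out : Int) : Decidable (Spec_count_digits_parts s out) := by unfold Spec_count_digits_parts; infer_instance

-- ===== CLAIM (what is proved, stated in full; the proofs are below) =====
def Claim_equal_count_digits_parts : Prop := ∀ (s : String), Dom_count_digits_parts s → Spec_count_digits_parts s (count_digits_parts s)

-- ===== LEMMAS AND PROOFS =====

-- Reference count: recursion carrying the digit-ness of the previous character.
def cdpCnt (prev : Bool) : List Char → Int
  | [] => 0
  | c :: cs =>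
    (if PySem.Chars.isdigit c && !prev then 1 else 0) + cdpCnt (PySem.Chars.isdigit c) cs

theorem cdpFoldA_eq (l : List Char) : ∀ (count : Int) (inGroup : Bool),
    (l.foldl cdpStepA (count, inGroup)).1 = count + cdpCnt inGroup l := by
  induction l with
  | nil => intro count inGroup; simp [cdpCnt]
  | cons c cs ih =>
    intro count inGroup
    by_cases h : PySem.Chars.isdigit c = true <;> cases inGroup <;>
      simp [cdpStepA, cdpCnt, h, ih] <;> ring

theorem cdpCnt_run (k : Bool) (run rest : List Char)
    (h : ∀ d ∈ run, PySem.Chars.isdigit d = k) :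
    cdpCnt k (run ++ rest) = cdpCnt k rest := by
  induction run with
  | nil => rfl
  | cons d ds ih =>
    have hd : PySem.Chars.isdigit d = k := h d (List.mem_cons_self ..)
    simp only [List.cons_append, cdpCnt, hd]
    cases k <;> simp [ih (fun e he => h e (List.mem_cons_of_mem _ he))]

theorem cdpCnt_nondigit_head (prev : Bool) (rest : List Char)
    (h : ∀ d ∈ rest.head?, PySem.Chars.isdigit d = false) :
    cdpCnt prev rest = cdpCnt false rest := by
  cases rest with
  | nil => rfl
  | cons d ds =>
    have hd : PySem.Chars.isdigit d = false := h d rfl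
    simp [cdpCnt, hd]

theorem cdpHead_dropWhile {p : Char → Bool} (l : List Char) :
    ∀ d ∈ (l.dropWhile p).head?, p d = false := by
  induction l with
  | nil => simp
  | cons c cs ih =>
    intro d hd
    by_cases hc : p c = true
    · rw [List.dropWhile_cons_of_pos hc] at hd; exact ih d hd
    · rw [List.dropWhile_cons_of_neg hc] at hd
      simp only [Option.mem_def, List.head?_cons, Option.some.injEq] at hd
      subst hd; simpa using hc

theorem cdpGroups_count (l : List Char) :
    (((cdpGroups l).filter (fun g => g.1)).length : Int) = cdpCnt false l := by
  induction l using cdpGroups.induct with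
  | case1 => simp [cdpGroups, cdpCnt]
  | case2 c cs k ih =>
    rw [cdpGroups]
    have hsplit : cs.takeWhile (fun d => PySem.Chars.isdigit d == PySem.Chars.isdigit c) ++
        cs.dropWhile (fun d => PySem.Chars.isdigit d == PySem.Chars.isdigit c) = cs :=
      List.takeWhile_append_dropWhile
    have hrun : ∀ d ∈ cs.takeWhile (fun d => PySem.Chars.isdigit d == PySem.Chars.isdigit c),
        PySem.Chars.isdigit d = PySem.Chars.isdigit c := by
      intro d hd; simpa using List.mem_takeWhile_imp hd
    have hcnt : cdpCnt (PySem.Chars.isdigit c) cs =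
        cdpCnt (PySem.Chars.isdigit c)
          (cs.dropWhile (fun d => PySem.Chars.isdigit d == PySem.Chars.isdigit c)) := by
      conv_lhs => rw [← hsplit]
      exact cdpCnt_run _ _ _ hrun
    have hhead := cdpHead_dropWhile (p := fun d => PySem.Chars.isdigit d == PySem.Chars.isdigit c) cs
    cases hk : PySem.Chars.isdigit c with
    | false =>
      rw [hk] at hcnt
      have ih' := ih
      rw [show k = false from hk] at ih'
      simp only [Bool.false_eq_true, if_false, cdpCnt, hk, Bool.false_and]
      rw [hcnt, List.filter_cons_of_neg (by simp), ih']
      ring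
    | true =>
      have hrest : ∀ d ∈ (cs.dropWhile
          (fun d => PySem.Chars.isdigit d == PySem.Chars.isdigit c)).head?,
          PySem.Chars.isdigit d = false := by
        intro d hd
        have := hhead d hd
        rw [hk] at this
        simpa using this
      rw [hk] at hcnt hrest
      have ih' := ih
      rw [show k = true from hk] at ih'
      simp only [cdpCnt, hk, List.filter_cons, Bool.true_and, Bool.not_false]
      rw [hcnt, cdpCnt_nondigit_head true _ hrest]
      simp only [if_pos trivial, List.length_cons]
      push_cast
      rw [ih']
      ring

-- ===== VERDICT (by name: the statement is the Claim_ definition above) =====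
theorem count_digits_parts_spec : Claim_equal_count_digits_parts := by
  intro s _
  unfold Spec_count_digits_parts count_digits_parts count_digits_parts_alt
  rw [cdpFoldA_eq, cdpGroups_count s.toList]
  ring
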